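-- pv_equiv track=rewrite | github.com/Soredemonemui/ArtificialSpinIce_Calculation_Simulation | track_monopole_line.py | boundary
-- ===== SOURCE A (Python) =====
-- def boundary(spins):
--     b_spins = {}
--     key_y = []
--     for key in spins.keys():
--         key_y.append(key[1])
--     for key in spins.keys():
--         if key[1] == max(key_y) or key[1] == min(key_y):
--             b_spins[key] = spins[key]
--     return b_spins
-- ===== SOURCE B (Python) =====
-- def boundary(spins):
--     groups = {}
--     for key, spin in spins.items():
--         groups.setdefault(key[1], []).append((key, spin))
--     if not groups:
--         return {}
--     chosen = {key for key, _ in groups[max(groups)] + groups[min(groups)]}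
--     return {key: spin for key, spin in spins.items() if key in chosen}
-- ===== Notes on version B (the rewrite author's own statement) =====
-- stated objective: faster
-- what changed: B builds a group-by dict mapping each y to its bucket of items in one setdefault pass, selects the buckets at max(groups)/min(groups) into a key set, and emits those keys in original order, instead of A's per-key recomputation of max(key_y)/min(key_y) inside the selection loop.
import Mathlib
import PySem

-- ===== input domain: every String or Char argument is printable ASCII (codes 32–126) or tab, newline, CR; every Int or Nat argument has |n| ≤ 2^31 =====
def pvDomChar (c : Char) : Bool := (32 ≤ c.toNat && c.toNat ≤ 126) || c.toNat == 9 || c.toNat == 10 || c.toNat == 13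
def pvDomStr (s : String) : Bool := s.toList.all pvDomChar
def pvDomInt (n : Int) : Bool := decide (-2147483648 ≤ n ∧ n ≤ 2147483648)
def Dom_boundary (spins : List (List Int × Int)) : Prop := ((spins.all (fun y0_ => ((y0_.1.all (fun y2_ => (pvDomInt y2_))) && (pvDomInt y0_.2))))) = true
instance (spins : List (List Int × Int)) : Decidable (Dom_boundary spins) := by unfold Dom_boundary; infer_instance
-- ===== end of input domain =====

-- B groups the spins by y into a dict of buckets in one pass, selects the buckets at
-- max(groups)/min(groups) into a key set and emits those keys in original order,
-- replacing A's per-key recomputation of max/min of all y's (faster, asymptotic).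


-- ===== PORT A =====
-- for key in spins: key_y.append(key[1]); then for key in spins:
--   if key[1] == max(key_y) or key[1] == min(key_y): b_spins[key] = spins[key]
-- key[1] is PySem.List.pyGetD (index valid under Pre_); max/min recomputed each
-- iteration, as in A (key_y is nonempty whenever the loop body runs, so getD 0 is
-- never the default); spins[key] is first-match association-list lookup (dict convention).
def boundary (spins : List (List Int × Int)) : List (List Int × Int) :=
  let key_y : List Int := spins.foldl (fun acc p => acc ++ [PySem.List.pyGetD p.1 1 0]) []
  spins.foldl (fun b p =>
    if PySem.List.pyGetD p.1 1 0 == (PySem.List.max? key_y (fun y => y)).getD 0 ||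
       PySem.List.pyGetD p.1 1 0 == (PySem.List.min? key_y (fun y => y)).getD 0
    then b ++ [(p.1, (List.lookup p.1 spins).getD 0)] else b) []

-- ===== PORT B =====
-- groups.setdefault(key[1], []).append((key, spin)) is Dict.modify y [] (· ++ [(key, spin)]);
-- 'if not groups' is the size test; max(groups)/min(groups) iterate the dict's keys;
-- the set comprehension over the two concatenated buckets is PySem.Set.ofList of the
-- mapped list; the final dict comprehension over spins.items() is the guarded insert fold.
def boundary_alt (spins : List (List Int × Int)) : List (List Int × Int) :=
  let groups : PySem.Dict Int (List (List Int × Int)) :=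
    spins.foldl (fun g p => g.modify (PySem.List.pyGetD p.1 1 0) [] (fun b => b ++ [(p.1, p.2)]))
      PySem.Dict.empty
  if groups.size == 0 then []
  else
    let hi : Int := (PySem.List.max? groups.keys (fun y => y)).getD 0
    let lo : Int := (PySem.List.min? groups.keys (fun y => y)).getD 0
    let chosen : PySem.Set (List Int) :=
      PySem.Set.ofList ((groups.getD hi [] ++ groups.getD lo []).map (fun q => q.1))
    (spins.foldl (fun r p => if chosen.contains p.1 then r.insert p.1 p.2 else r)
      (PySem.Dict.empty : PySem.Dict (List Int) Int)).items

-- ===== PRECONDITION & SPEC =====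
-- Pre_ excludes keys of length < 2 (Python raises IndexError on key[1]) and
-- association lists with duplicate keys (a Python dict cannot contain them).
def Pre_boundary (spins : List (List Int × Int)) : Prop :=
  (spins.map Prod.fst).Nodup ∧ ∀ p ∈ spins, 2 ≤ p.1.length
instance (spins : List (List Int × Int)) : Decidable (Pre_boundary spins) := by unfold Pre_boundary; infer_instance
def pvWitness_boundary : (List (List Int × Int)) := [([0, 5], 1), ([1, 3], -1), ([2, 5], 2)]
def Spec_boundary (spins : List (List Int × Int)) (out : List (List Int × Int)) : Prop := out = boundary_alt spins
instance (spins : List (List Int × Int)) (out : List (List Int × Int)) : Decidable (Spec_boundary spins out) := by unfold Spec_boundary; infer_instance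

-- ===== CLAIM (what is proved, stated in full; the proofs are below) =====
def Claim_equal_boundary : Prop := ∀ (spins : List (List Int × Int)), Dom_boundary spins → Pre_boundary spins → Spec_boundary spins (boundary spins)

-- ===== LEMMAS AND PROOFS =====

-- first-match lookup of an item's own key in a duplicate-free association list
theorem lookup_fst_self {spins : List (List Int × Int)}
    (hnd : (spins.map Prod.fst).Nodup) {p : List Int × Int} (hp : p ∈ spins) :
    List.lookup p.1 spins = some p.2 := by
  induction spins with
  | nil => cases hp
  | cons q t ih =>
    simp only [List.map_cons, List.nodup_cons] at hnd
    rcases List.mem_cons.mp hp with rfl | hpt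
    · simp [List.lookup]
    · have hne : (p.1 == q.1) = false := by
        refine beq_eq_false_iff_ne.mpr ?_
        intro h
        exact hnd.1 (h ▸ List.mem_map.mpr ⟨p, hpt, rfl⟩)
      simp [List.lookup, hne, ih hnd.2 hpt]

-- two members of a list whose fst-image (here: the keys) is duplicate-free agree
theorem eq_of_mem_of_map_nodup {α β : Type} (f : α → β) {l : List α}
    (h : (l.map f).Nodup) {a b : α} (ha : a ∈ l) (hb : b ∈ l) (hf : f a = f b) : a = b := by
  induction l with
  | nil => cases ha
  | cons x t ih =>
    simp only [List.map_cons, List.nodup_cons] at h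
    rcases List.mem_cons.mp ha with rfl | hat
    · rcases List.mem_cons.mp hb with rfl | hbt
      · rfl
      · exact absurd (hf ▸ List.mem_map.mpr ⟨b, hbt, rfl⟩) h.1
    · rcases List.mem_cons.mp hb with rfl | hbt
      · exact absurd (hf ▸ List.mem_map.mpr ⟨a, hat, rfl⟩) h.1
      · exact ih h.2 hat hbt

-- max()/min() over two lists with the same elements (keys of the group-by dict vs
-- the full y-list) return the same value
theorem max_mem_eq (l1 l2 : List Int) (h : ∀ x, x ∈ l1 ↔ x ∈ l2) :
    PySem.List.max? l1 (fun y => y) = PySem.List.max? l2 (fun y => y) := by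
  cases h1 : PySem.List.max? l1 (fun y => y) with
  | none =>
    rw [PySem.List.max?_eq_none_iff] at h1
    cases h2 : PySem.List.max? l2 (fun y => y) with
    | none => rfl
    | some m => exact absurd ((h m).mpr (PySem.List.max?_mem h2)) (by simp [h1])
  | some m =>
    cases h2 : PySem.List.max? l2 (fun y => y) with
    | none =>
      rw [PySem.List.max?_eq_none_iff] at h2
      exact absurd ((h m).mp (PySem.List.max?_mem h1)) (by simp [h2])
    | some m' =>
      have := PySem.List.max?_isMax h1 m' ((h m').mpr (PySem.List.max?_mem h2))
      have := PySem.List.max?_isMax h2 m ((h m).mp (PySem.List.max?_mem h1))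
      simp only [Option.some.injEq]
      omega

theorem min_mem_eq (l1 l2 : List Int) (h : ∀ x, x ∈ l1 ↔ x ∈ l2) :
    PySem.List.min? l1 (fun y => y) = PySem.List.min? l2 (fun y => y) := by
  cases h1 : PySem.List.min? l1 (fun y => y) with
  | none =>
    rw [PySem.List.min?_eq_none_iff] at h1
    cases h2 : PySem.List.min? l2 (fun y => y) with
    | none => rfl
    | some m => exact absurd ((h m).mpr (PySem.List.min?_mem h2)) (by simp [h1])
  | some m =>
    cases h2 : PySem.List.min? l2 (fun y => y) with
    | none =>
      rw [PySem.List.min?_eq_none_iff] at h2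
      exact absurd ((h m).mp (PySem.List.min?_mem h1)) (by simp [h2])
    | some m' =>
      have := PySem.List.min?_isMin h1 m' ((h m').mpr (PySem.List.min?_mem h2))
      have := PySem.List.min?_isMin h2 m ((h m).mp (PySem.List.min?_mem h1))
      simp only [Option.some.injEq]
      omega

-- the bucket of the group-by dict at y is the sublist of spins with that y, in order
theorem groups_getD (spins : List (List Int × Int)) (y : Int) :
    (spins.foldl (fun g p => g.modify (PySem.List.pyGetD p.1 1 0) [] (fun b => b ++ [(p.1, p.2)]))
      PySem.Dict.empty).getD y []
    = spins.filter (fun p => PySem.List.pyGetD p.1 1 0 == y) := by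
  rw [show (fun (g : PySem.Dict Int (List (List Int × Int))) (p : List Int × Int) =>
        g.modify (PySem.List.pyGetD p.1 1 0) [] (fun b => b ++ [(p.1, p.2)]))
      = (fun g p => g.modify (PySem.List.pyGetD p.1 1 0) [] (fun b => b ++ [p])) from by
        funext g p; rfl]
  rw [← List.foldl_map (f := fun p : List Int × Int => (PySem.List.pyGetD p.1 1 0, p))
      (g := fun (g : PySem.Dict Int (List (List Int × Int))) q => g.modify q.1 [] (fun b => b ++ [q.2]))]
  rw [PySem.Dict.getD_foldl_modify_append]
  simp [List.filter_map, Function.comp_def]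

-- the keys of the group-by dict are the distinct y's
theorem groups_keys (spins : List (List Int × Int)) :
    (spins.foldl (fun g p => g.modify (PySem.List.pyGetD p.1 1 0) [] (fun b => b ++ [(p.1, p.2)]))
      PySem.Dict.empty).keys
    = PySem.Set.ofList (spins.map (fun p => PySem.List.pyGetD p.1 1 0)) := by
  rw [PySem.Dict.keys_foldl_modify_key (key := fun p : List Int × Int => PySem.List.pyGetD p.1 1 0)]
  simp [PySem.Set.update_nil_left]

-- B's final dict comprehension over distinct fresh keys builds exactly the filter
theorem items_foldl_filter {c : List Int × Int → Bool} :
    ∀ (l : List (List Int × Int)) (d : PySem.Dict (List Int) Int),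
    (∀ p ∈ l, d.contains p.1 = false) → (l.map Prod.fst).Nodup →
    (l.foldl (fun r p => if c p then r.insert p.1 p.2 else r) d).items
    = d.items ++ l.filter c := by
  intro l
  induction l with
  | nil => simp
  | cons p t ih =>
    intro d hfresh hnd
    simp only [List.map_cons, List.nodup_cons] at hnd
    simp only [List.foldl_cons]
    by_cases hc : c p
    · simp only [hc, if_true]
      rw [ih _ ?_ hnd.2]
      · rw [PySem.Dict.items_insert_of_not_contains (h := hfresh p (by simp))]
        simp [hc]
      · intro q hq
        simp only [PySem.Dict.contains_insert]
        have : (q.1 == p.1) = false := by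
          refine beq_eq_false_iff_ne.mpr ?_
          intro h
          exact hnd.1 (h ▸ List.mem_map.mpr ⟨q, hq, rfl⟩)
        simp [this, hfresh q (by simp [hq])]
    · simp only [hc, if_neg, Bool.false_eq_true, not_false_iff]
      rw [ih _ (fun q hq => hfresh q (by simp [hq])) hnd.2]
      simp [hc]

-- membership of a spin's key in the merged extreme buckets is the extreme-y test
theorem chosen_contains (spins : List (List Int × Int)) (hi lo : Int)
    (hnd : (spins.map Prod.fst).Nodup) {p : List Int × Int} (hp : p ∈ spins) :
    PySem.Set.contains (PySem.Set.ofList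
      ((spins.filter (fun r => PySem.List.pyGetD r.1 1 0 == hi)
        ++ spins.filter (fun r => PySem.List.pyGetD r.1 1 0 == lo)).map (fun q => q.1))) p.1
    = (PySem.List.pyGetD p.1 1 0 == hi || PySem.List.pyGetD p.1 1 0 == lo) := by
  by_cases h : (PySem.List.pyGetD p.1 1 0 == hi || PySem.List.pyGetD p.1 1 0 == lo) = true
  · rw [h]
    rw [PySem.Set.contains_iff]
    rw [PySem.Set.mem_ofList]
    rcases Bool.or_eq_true_iff.mp h with h1 | h1
    · exact List.mem_map.mpr ⟨p, List.mem_append_left _ (List.mem_filter.mpr ⟨hp, h1⟩), rfl⟩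
    · exact List.mem_map.mpr ⟨p, List.mem_append_right _ (List.mem_filter.mpr ⟨hp, h1⟩), rfl⟩
  · rw [Bool.not_eq_true] at h
    rw [h]
    rw [← Bool.not_eq_true, PySem.Set.contains_iff, PySem.Set.mem_ofList]
    intro hmem
    rcases List.mem_map.mp hmem with ⟨r, hr, hr1⟩
    have hrs : r ∈ spins ∧ (PySem.List.pyGetD r.1 1 0 == hi || PySem.List.pyGetD r.1 1 0 == lo) = true := by
      rcases List.mem_append.mp hr with h1 | h1
      · exact ⟨(List.mem_filter.mp h1).1, by simp [(List.mem_filter.mp h1).2]⟩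
      · exact ⟨(List.mem_filter.mp h1).1, by simp [(List.mem_filter.mp h1).2]⟩
    have : r = p := eq_of_mem_of_map_nodup Prod.fst hnd hrs.1 hp hr1
    rw [this] at hrs
    rw [h] at hrs
    exact Bool.false_ne_true hrs.2

-- ===== VERDICT (by name: the statement is the Claim_ definition above) =====
theorem boundary_spec : Claim_equal_boundary := by
  intro spins _ hpre
  obtain ⟨hnd, -⟩ := hpre
  unfold Spec_boundary boundary boundary_alt
  cases spins with
  | nil => rfl
  | cons q t =>
    simp only []   -- zeta-reduce the lets
    -- ---- A's side: two loops become filter-then-map with the running extremes ----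
    rw [PySem.List.foldl_append_singleton_eq_map (f := fun p : List Int × Int => PySem.List.pyGetD p.1 1 0)]
    simp only [List.nil_append]
    refine Eq.trans (PySem.List.foldl_append_if
        (p := fun p : List Int × Int =>
              PySem.List.pyGetD p.1 1 0 ==
                (PySem.List.max? ((q :: t).map fun p => PySem.List.pyGetD p.1 1 0) (fun y => y)).getD 0 ||
              PySem.List.pyGetD p.1 1 0 ==
                (PySem.List.min? ((q :: t).map fun p => PySem.List.pyGetD p.1 1 0) (fun y => y)).getD 0)
        (f := fun p : List Int × Int => (p.1, (List.lookup p.1 (q :: t)).getD 0))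
        (l := q :: t) (acc := [])) ?_
    simp only [List.nil_append]
    have hmap : ∀ (l : List (List Int × Int)), (∀ p ∈ l, p ∈ q :: t) →
        l.map (fun p => (p.1, (List.lookup p.1 (q :: t)).getD 0)) = l := by
      intro l hl
      conv_rhs => rw [← List.map_id l]
      apply List.map_congr_left
      intro p hp
      simp [lookup_fst_self hnd (hl p hp)]
    rw [hmap _ (fun p hp => (List.mem_filter.mp hp).1)]
    -- ---- B's side ----
    set G := (q :: t).foldl
        (fun g p => g.modify (PySem.List.pyGetD p.1 1 0) [] (fun b => b ++ [(p.1, p.2)]))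
        PySem.Dict.empty with hG
    have hkeys : G.keys = PySem.Set.ofList ((q :: t).map (fun p => PySem.List.pyGetD p.1 1 0)) :=
      groups_keys (q :: t)
    -- the dict is nonempty: its key set contains q's y
    have hkne : G.keys ≠ [] := by
      intro hE
      have hmem : PySem.List.pyGetD q.1 1 0 ∈ G.keys := by
        rw [hkeys]
        exact (PySem.Set.mem_ofList _ _).mpr (by simp)
      rw [hE] at hmem
      cases hmem
    have hsz : (G.size == 0) = false := by
      have h1 : G.size = G.keys.length := by simp [PySem.Dict.size, PySem.Dict.keys]
      have h2 : G.keys.length ≠ 0 := fun h => hkne (List.eq_nil_of_length_eq_zero h)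
      simp [h1, h2]
    rw [hsz]
    simp only [Bool.false_eq_true, if_false]
    -- max(groups)/min(groups) are max/min of all the y's
    have hmax : PySem.List.max? G.keys (fun y => y)
        = PySem.List.max? ((q :: t).map (fun p => PySem.List.pyGetD p.1 1 0)) (fun y => y) :=
      max_mem_eq _ _ (fun x => by rw [hkeys]; exact PySem.Set.mem_ofList _ _)
    have hmin : PySem.List.min? G.keys (fun y => y)
        = PySem.List.min? ((q :: t).map (fun p => PySem.List.pyGetD p.1 1 0)) (fun y => y) :=
      min_mem_eq _ _ (fun x => by rw [hkeys]; exact PySem.Set.mem_ofList _ _)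
    rw [hmax, hmin, groups_getD, groups_getD]
    -- the final comprehension is a filter over spins
    rw [items_foldl_filter (q :: t) PySem.Dict.empty (by simp) hnd]
    simp only [show (PySem.Dict.empty : PySem.Dict (List Int) Int).items = [] from rfl, List.nil_append]
    -- and membership in the merged extreme buckets is exactly A's test
    refine (List.filter_congr ?_).symm
    intro p hp
    exact chosen_contains (q :: t) _ _ hnd hp
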